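-- pv_equiv track=rewrite | github.com/gns0314/codestudy | 프로그래머스/unrated/181874. A 강조하기/A 강조하기.py | solution
-- ===== SOURCE A (Python) =====
-- def solution(myString):
--     answer = ''
--     for i in myString:
--         if i == 'a':
--             answer += i.upper()
--         elif i != 'a' and i != 'A':
--             answer += i.lower()
--         else:
--             answer += i
--     return answer
-- ===== SOURCE B (Python) =====
-- def solution(myString):
--     return myString.lower().replace('a', 'A')
-- ===== Notes on version B (the rewrite author's own statement) =====
-- stated objective: idiomatic
-- what changed: Replaced the explicit per-character loop with a three-way conditional by two whole-string operations: lowercase everything, then replace every lowercase-a with uppercase-A.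
import Mathlib
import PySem

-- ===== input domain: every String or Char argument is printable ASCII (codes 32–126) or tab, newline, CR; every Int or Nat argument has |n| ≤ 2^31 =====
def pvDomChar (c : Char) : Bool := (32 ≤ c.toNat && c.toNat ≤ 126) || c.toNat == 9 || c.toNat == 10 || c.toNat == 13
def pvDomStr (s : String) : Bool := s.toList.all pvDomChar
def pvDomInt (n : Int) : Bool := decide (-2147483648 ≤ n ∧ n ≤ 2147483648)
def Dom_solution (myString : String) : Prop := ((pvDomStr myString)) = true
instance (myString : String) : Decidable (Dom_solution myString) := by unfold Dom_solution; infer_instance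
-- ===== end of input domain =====

-- B replaces A's per-character loop by two whole-string passes: lower() then replace('a','A') (idiomatic).

-- ===== PORT A =====
-- the loop `for i in myString: answer += …` with the three-way conditional,
-- on the character list (i.upper()/i.lower() on a single ASCII char = upperChar/lowerChar)
def solution (myString : String) : String :=
  String.ofList (myString.toList.foldl
    (fun answer i =>
      answer ++ (if i == 'a' then [PySem.Chars.upperChar i]
                 else if i != 'a' && i != 'A' then [PySem.Chars.lowerChar i]
                 else [i]))
    [])

-- ===== PORT B =====
def solution_alt (myString : String) : String :=
  PySem.Str.replace (PySem.Str.lower myString) "a" "A"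

-- ===== PRECONDITION & SPEC =====
def Spec_solution (myString : String) (out : String) : Prop := out = solution_alt myString
instance (myString : String) (out : String) : Decidable (Spec_solution myString out) := by unfold Spec_solution; infer_instance

-- ===== CLAIM (what is proved, stated in full; the proofs are below) =====
def Claim_equal_solution : Prop := ∀ (myString : String), Dom_solution myString → Spec_solution myString (solution myString)

-- ===== LEMMAS AND PROOFS =====

-- the per-character map both sides compute
def pvStep (i : Char) : Char :=
  if i == 'a' then PySem.Chars.upperChar i
  else if i != 'a' && i != 'A' then PySem.Chars.lowerChar i
  else i

lemma pvFoldA (cs : List Char) (acc : List Char) :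
    cs.foldl (fun answer i =>
      answer ++ (if i == 'a' then [PySem.Chars.upperChar i]
                 else if i != 'a' && i != 'A' then [PySem.Chars.lowerChar i]
                 else [i])) acc = acc ++ cs.map pvStep := by
  induction cs generalizing acc with
  | nil => simp
  | cons c t ih =>
    simp only [List.foldl_cons, List.map_cons, ih, pvStep]
    split_ifs <;> simp

-- replace.go with old = "a": consumes one char and one fuel per step
lemma pvGo (cs : List Char) (fuel : Nat) (acc : List Char) (h : cs.length ≤ fuel) :
    PySem.Chars.replace.go ['a'] ['A'] fuel cs acc
      = acc.reverse ++ cs.map (fun c => if c = 'a' then 'A' else c) := by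
  induction cs generalizing fuel acc with
  | nil => cases fuel <;> simp [PySem.Chars.replace.go]
  | cons c t ih =>
    cases fuel with
    | zero => simp at h
    | succ f =>
      simp only [PySem.Chars.replace.go]
      simp only [List.length_cons] at h
      by_cases hc : c = 'a'
      · subst hc
        have hp : List.isPrefixOf ['a'] ('a' :: t) = true := by simp [List.isPrefixOf]
        rw [if_pos hp, show List.drop (List.length ['a']) ('a' :: t) = t from rfl,
            ih f _ (by omega)]
        simp
      · have hp : List.isPrefixOf ['a'] (c :: t) = false := by
          simp only [List.isPrefixOf, Bool.and_eq_false_iff, beq_eq_false_iff_ne, ne_eq]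
          left; exact fun h => hc h.symm
        rw [Bool.eq_false_iff] at hp
        rw [if_neg (by simpa using hp), ih f _ (by omega)]
        simp [hc]

lemma pvOfNatToNat (n : Nat) (h : n < 55296) : (Char.ofNat n).toNat = n := by
  simp [Char.ofNat, Nat.isValidChar, h]

lemma pvEqOfToNat (c : Char) (h : c.toNat = 65) : c = 'A' := by
  apply Char.ext
  have : c.val.toNat = (65 : UInt32).toNat := h
  exact UInt32.toNat_inj.mp this

lemma pvLowerChar_eq_a {c : Char} (h : PySem.Chars.lowerChar c = 'a') :
    c = 'a' ∨ c = 'A' := by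
  unfold PySem.Chars.lowerChar PySem.Chars.isupper at h
  split_ifs at h with hu
  · right
    simp only [decide_eq_true_eq, Bool.and_eq_true] at hu
    have h1 : 65 ≤ c.toNat := by
      have := hu.1; rw [Char.le_def, UInt32.le_iff_toNat_le] at this; exact this
    have h2 : c.toNat ≤ 90 := by
      have := hu.2; rw [Char.le_def, UInt32.le_iff_toNat_le] at this; exact this
    have := congrArg Char.toNat h
    rw [pvOfNatToNat _ (by omega)] at this
    have ha : ('a' : Char).toNat = 97 := by decide
    rw [ha] at this
    exact pvEqOfToNat c (by omega)
  · left; exact h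

lemma pvLowerChar_A : PySem.Chars.lowerChar 'A' = 'a' := by decide
lemma pvLowerChar_a : PySem.Chars.lowerChar 'a' = 'a' := by decide

lemma pvStep_eq (c : Char) :
    pvStep c = (if PySem.Chars.lowerChar c = 'a' then 'A' else PySem.Chars.lowerChar c) := by
  unfold pvStep
  by_cases h1 : c = 'a'
  · subst h1; simp [pvLowerChar_a]; decide
  · by_cases h2 : c = 'A'
    · subst h2; simp [pvLowerChar_A]
    · have hne : PySem.Chars.lowerChar c ≠ 'a' := by
        intro h; rcases pvLowerChar_eq_a h with h | h <;> [exact h1 h; exact h2 h]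
      simp [h1, h2, hne]

-- ===== VERDICT (by name: the statement is the Claim_ definition above) =====
theorem solution_spec : Claim_equal_solution := by
  intro s _
  unfold solution Spec_solution solution_alt
  apply String.toList_injective
  rw [PySem.Str.toList_replace, PySem.Str.toList_lower, String.toList_ofList, pvFoldA]
  unfold PySem.Chars.replace
  rw [if_neg (by decide)]
  rw [show ("a".toList : List Char) = ['a'] from rfl, show ("A".toList : List Char) = ['A'] from rfl]
  rw [pvGo _ _ _ (le_refl _)]
  simp only [List.nil_append, List.reverse_nil, PySem.Chars.lower, List.map_map]
  apply List.map_congr_left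
  intro c _
  simpa [Function.comp] using pvStep_eq c
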